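-- pv_equiv track=rewrite | github.com/AP-MI-2021/lab-4-TaniaMarchis | main.py | AdaugaNrDivProprii
-- ===== SOURCE A (Python) =====
-- def AdaugaNrDivProprii(l):
--     '''
--     adauga nr de divizori proprii ai unui nr dupa acesta
--     :param l: lista de nr intregi
--     :return: lista cu nr de divizori adaugat dupa fiecare element
--     '''
--
--     rezultat=[]
--     for x in l:
--         rezultat.append(x)
--         nr=0
--         for i in range(2,x//2+1):
--             if x%i==0:
--                 nr=nr+1
--         rezultat.append(nr)
--     return rezultat
-- ===== SOURCE B (Python) =====
-- def AdaugaNrDivProprii(l):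
--     '''Same interleaving, but counts proper divisors by pairing divisors
--     d and x//d up to sqrt(x): O(sqrt(x)) per element instead of O(x).'''
--     rezultat = []
--     for x in l:
--         rezultat.append(x)
--         if x <= 1:
--             rezultat.append(0)
--             continue
--         nr = 0
--         i = 2
--         while i * i <= x:
--             if x % i == 0:
--                 nr += 1 if i * i == x else 2
--             i += 1
--         rezultat.append(nr)
--     return rezultat
-- ===== Notes on version B (the rewrite author's own statement) =====
-- stated objective: faster
-- what changed: Replaces A's per-element trial division over every candidate in 2..x//2 with counting divisor pairs (i, x//i) for i up to sqrt(x), weighting each divisor i <= sqrt(x) by 2 (or 1 when i*i == x), so each element costs O(sqrt(x)) instead of O(x).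
import Mathlib
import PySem

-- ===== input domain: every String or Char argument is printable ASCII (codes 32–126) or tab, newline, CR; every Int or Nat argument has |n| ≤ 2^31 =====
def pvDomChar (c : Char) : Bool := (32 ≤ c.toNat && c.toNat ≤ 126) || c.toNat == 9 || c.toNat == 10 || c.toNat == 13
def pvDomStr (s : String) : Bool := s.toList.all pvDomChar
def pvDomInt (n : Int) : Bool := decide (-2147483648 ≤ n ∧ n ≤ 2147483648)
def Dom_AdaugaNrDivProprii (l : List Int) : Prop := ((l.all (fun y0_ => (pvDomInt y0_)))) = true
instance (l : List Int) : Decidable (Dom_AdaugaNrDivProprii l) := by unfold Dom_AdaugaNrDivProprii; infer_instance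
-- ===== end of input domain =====

-- B replaces A's per-element trial division over 2..x//2 by counting divisor
-- pairs (i, x//i) with i up to sqrt(x): O(sqrt x) per element instead of O(x).

-- ===== PORT A =====
def AdaugaNrDivProprii (l : List Int) : List Int :=
  l.foldl (fun rezultat x =>
    (rezultat ++ [x]) ++
      [(PySem.List.pyRange 2 (PySem.Int.floordiv x 2 + 1) 1).foldl
        (fun nr i => if PySem.Int.mod x i = 0 then nr + 1 else nr) 0]) []

-- ===== PORT B =====
-- the 'while i * i <= x' loop of Source B
def pvAltLoop (x i nr : Int) : Int :=
  if _h : i * i ≤ x then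
    pvAltLoop x (i + 1)
      (if PySem.Int.mod x i = 0 then (if i * i = x then nr + 1 else nr + 2) else nr)
  else nr
termination_by (x + 2 - i).toNat
decreasing_by
  have hii : i ≤ i * i := by
    rcases le_or_gt i 0 with h0 | h0
    · exact le_trans h0 (mul_self_nonneg i)
    · have h1 : i * 1 ≤ i * i := mul_le_mul_of_nonneg_left (by omega) (by omega)
      rwa [mul_one] at h1
  omega

def AdaugaNrDivProprii_alt (l : List Int) : List Int :=
  l.foldl (fun rezultat x =>
    (rezultat ++ [x]) ++ (if x ≤ 1 then [0] else [pvAltLoop x 2 0])) []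

-- ===== PRECONDITION & SPEC =====
def Spec_AdaugaNrDivProprii (l : List Int) (out : List Int) : Prop := out = AdaugaNrDivProprii_alt l
instance (l : List Int) (out : List Int) : Decidable (Spec_AdaugaNrDivProprii l out) := by unfold Spec_AdaugaNrDivProprii; infer_instance

-- ===== CLAIM (what is proved, stated in full; the proofs are below) =====
def Claim_equal_AdaugaNrDivProprii : Prop := ∀ (l : List Int), Dom_AdaugaNrDivProprii l → Spec_AdaugaNrDivProprii l (AdaugaNrDivProprii l)

-- ===== LEMMAS AND PROOFS =====

-- abbreviation used only by the proofs: A's inner loop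
def pvCntA (x : Int) : Int :=
  (PySem.List.pyRange 2 (PySem.Int.floordiv x 2 + 1) 1).foldl
    (fun nr i => if PySem.Int.mod x i = 0 then nr + 1 else nr) 0

-- sqrt bracket in the m*m form
theorem pv_sqrt_lt (n m : ℕ) : Nat.sqrt n < m ↔ n < m*m := by
  rw [← not_le, Nat.le_sqrt, not_le]

-- Mod-by-a-positive-divisor is 0 iff the divisor divides (Nat form)
theorem pv_mod_zero (n : ℕ) (i : Int) (hi : 0 < i) :
    PySem.Int.mod (n : Int) i = 0 ↔ i.toNat ∣ n := by
  rw [PySem.Int.mod_eq_zero_iff_dvd]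
  constructor
  · intro h
    exact Int.ofNat_dvd.mp (by rwa [Int.toNat_of_nonneg (by omega)])
  · intro h
    have h2 := Int.ofNat_dvd.mpr h
    rwa [Int.toNat_of_nonneg (by omega)] at h2

-- List.countP over List.range equals a Finset.range filter card
theorem pv_countP_range (N : ℕ) (q : ℕ → Bool) :
    (List.range N).countP q = ((Finset.range N).filter (fun k => q k = true)).card := by
  induction N with
  | zero => simp
  | succ N ih =>
    rw [List.range_succ, List.countP_append, Finset.range_add_one, Finset.filter_insert]
    by_cases h : q N = true
    · rw [if_pos h, Finset.card_insert_of_notMem (by simp)]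
      simp [h, ih]
    · rw [if_neg h]
      simp [h, ih]

-- A's count, for x = n ≥ 2, as a Finset card of proper divisors in [2, n/2]
theorem pv_cntA_eq_card (n : ℕ) (hn : 2 ≤ n) :
    pvCntA (n : Int) = (((Finset.Icc 2 (n/2)).filter (fun d => d ∣ n)).card : Int) := by
  unfold pvCntA
  have hfd : PySem.Int.floordiv (n : Int) 2 = ((n / 2 : ℕ) : Int) := by
    exact_mod_cast PySem.Int.floordiv_natCast n 2
  rw [hfd, PySem.List.foldl_ite_add_one (fun i => PySem.Int.mod (n : Int) i = 0),
      PySem.List.pyRange_one, List.countP_map]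
  have hlen : (((n / 2 : ℕ) : Int) + 1 - 2).toNat = n / 2 - 1 := by omega
  rw [hlen, pv_countP_range]
  norm_cast
  rw [zero_add]
  apply Finset.card_nbij' (fun k => 2 + k) (fun d => d - 2)
  · intro k hk
    simp only [Finset.mem_coe, Finset.mem_filter, Finset.mem_range, Function.comp_apply,
      decide_eq_true_eq] at hk
    obtain ⟨hk1, hk2⟩ := hk
    rw [pv_mod_zero n (((2 + k : ℕ) : Int)) (by omega), Int.toNat_natCast] at hk2
    simp only [Finset.mem_coe, Finset.mem_filter, Finset.mem_Icc]
    exact ⟨⟨by omega, by omega⟩, hk2⟩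
  · intro d hd
    simp only [Finset.mem_coe, Finset.mem_filter, Finset.mem_Icc] at hd
    simp only [Finset.mem_coe, Finset.mem_filter, Finset.mem_range, Function.comp_apply,
      decide_eq_true_eq]
    refine ⟨by omega, ?_⟩
    rw [pv_mod_zero n (((2 + (d - 2) : ℕ) : Int)) (by omega), Int.toNat_natCast]
    have hd2 : 2 + (d - 2) = d := by omega
    rw [hd2]
    exact hd.2
  · intro k _
    show 2 + k - 2 = k
    omega
  · intro d hd
    simp only [Finset.mem_coe, Finset.mem_filter, Finset.mem_Icc] at hd
    show 2 + (d - 2) = d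
    omega

-- B's loop, for x = n ≥ 2 and cursor i ≥ 2, adds the pair-weighted count of
-- divisors in [i, sqrt n]
theorem pv_altLoop_eq (n : ℕ) (hn : 2 ≤ n) :
    ∀ (fuel : ℕ) (i nr : Int), 2 ≤ i → ((n : Int) + 2 - i).toNat ≤ fuel →
      pvAltLoop (n : Int) i nr
        = nr + ((∑ j ∈ (Finset.Icc i.toNat (Nat.sqrt n)).filter (fun d => d ∣ n),
            (if j*j = n then 1 else 2) : ℕ) : Int) := by
  intro fuel
  induction fuel with
  | zero =>
    intro i nr hi hf
    have hin : (n : Int) + 2 ≤ i := by omega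
    rw [pvAltLoop]
    have hgt : ¬ i * i ≤ (n : Int) := by
      intro hc
      have h1 : i * 1 ≤ i * i := mul_le_mul_of_nonneg_left (by omega) (by omega)
      rw [mul_one] at h1
      omega
    rw [dif_neg hgt]
    have hempty : Nat.sqrt n < i.toNat := by
      rw [pv_sqrt_lt]
      have h1 : n < i.toNat := by omega
      have h2 : i.toNat ≤ i.toNat * i.toNat := Nat.le_mul_of_pos_left _ (by omega)
      omega
    rw [Finset.Icc_eq_empty (by omega)]
    simp
  | succ fuel ih =>
    intro i nr hi hf
    rw [pvAltLoop]
    by_cases hle : i * i ≤ (n : Int)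
    · rw [dif_pos hle]
      have hin : i ≤ (n : Int) := by
        have h1 : i * 1 ≤ i * i := mul_le_mul_of_nonneg_left (by omega) (by omega)
        rw [mul_one] at h1
        omega
      have hrec := ih (i + 1) (if PySem.Int.mod (n:Int) i = 0 then (if i * i = (n:Int) then nr + 1 else nr + 2) else nr) (by omega) (by omega)
      rw [hrec]
      have hit : (i + 1).toNat = i.toNat + 1 := by omega
      have his : i.toNat ≤ Nat.sqrt n := by
        rw [Nat.le_sqrt]
        have : (i.toNat : Int) * (i.toNat : Int) ≤ (n : Int) := by
          rw [Int.toNat_of_nonneg (by omega)]; exact hle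
        exact_mod_cast this
      have hsplit : Finset.Icc i.toNat (Nat.sqrt n)
          = insert i.toNat (Finset.Icc (i.toNat + 1) (Nat.sqrt n)) := by
        ext a; simp [Finset.mem_Icc]; omega
      rw [hsplit, Finset.filter_insert]
      have hmod := pv_mod_zero n i (by omega)
      by_cases hdvd : i.toNat ∣ n
      · rw [if_pos hdvd, Finset.sum_insert (by simp [Finset.mem_filter, Finset.mem_Icc])]
        have hmul : i * i = (n : Int) ↔ i.toNat * i.toNat = n := by
          rw [show i = (i.toNat : Int) by omega]
          exact_mod_cast Iff.rfl
        rw [if_pos (hmod.mpr hdvd), hit]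
        by_cases hsq : i.toNat * i.toNat = n
        · rw [if_pos (hmul.mpr hsq), if_pos hsq]; push_cast; ring
        · rw [if_neg (fun h => hsq (hmul.mp h)), if_neg hsq]; push_cast; ring
      · rw [if_neg hdvd, if_neg (fun h => hdvd (hmod.mp h)), hit]
    · rw [dif_neg hle]
      have hempty : Nat.sqrt n < i.toNat := by
        rw [pv_sqrt_lt]
        have : (n : Int) < (i.toNat : Int) * (i.toNat : Int) := by
          rw [Int.toNat_of_nonneg (by omega)]; omega
        exact_mod_cast this
      rw [Finset.Icc_eq_empty (by omega)]
      simp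

-- The divisor-pairing identity: proper divisors of n in [2, n/2] are counted by
-- weighting each divisor j ≤ sqrt n with 2 (for j and n/j) or 1 (when j*j = n).
theorem pv_key (n : ℕ) (hn : 2 ≤ n) :
    ((Finset.Icc 2 (n/2)).filter (fun d => d ∣ n)).card
      = ∑ j ∈ (Finset.Icc 2 (Nat.sqrt n)).filter (fun d => d ∣ n),
          (if j*j = n then 1 else 2) := by
  set s := Nat.sqrt n with hs
  set S := (Finset.Icc 2 s).filter (fun d => d ∣ n) with hS
  set A := (Finset.Icc 2 (n/2)).filter (fun d => d ∣ n) with hA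
  have hrhs : ∑ j ∈ S, (if j*j = n then 1 else 2)
      = S.card + (S.filter (fun j => j*j < n)).card := by
    have h1 : ∀ j ∈ S, (if j*j = n then 1 else 2)
        = 1 + (if j*j < n then 1 else 0) := by
      intro j hj
      simp only [hS, Finset.mem_filter, Finset.mem_Icc] at hj
      have : j * j ≤ n := Nat.le_sqrt.mp hj.1.2
      split_ifs <;> omega
    rw [Finset.sum_congr rfl h1, Finset.sum_add_distrib, Finset.sum_const, smul_eq_mul,
        mul_one]
    simp [Finset.sum_boole]
  have hsplitA : A.card = (A.filter (fun d => d ≤ s)).card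
      + (A.filter (fun d => ¬ d ≤ s)).card :=
    (Finset.card_filter_add_card_filter_not (s := A) (fun d => d ≤ s)).symm
  have hsmall : A.filter (fun d => d ≤ s) = S := by
    ext d
    simp only [hA, hS, Finset.mem_filter, Finset.mem_Icc]
    constructor
    · rintro ⟨⟨⟨h2, _⟩, hdvd⟩, hds⟩
      exact ⟨⟨h2, hds⟩, hdvd⟩
    · rintro ⟨⟨h2, hds⟩, hdvd⟩
      have hdd : d * d ≤ n := Nat.le_sqrt.mp hds
      have h2d : 2 * d ≤ d * d := Nat.mul_le_mul_right d h2
      exact ⟨⟨⟨h2, by omega⟩, hdvd⟩, hds⟩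
  have hbig : (A.filter (fun d => ¬ d ≤ s)).card
      = (S.filter (fun j => j*j < n)).card := by
    apply Finset.card_nbij' (fun d => n / d) (fun j => n / j)
    · intro d hd
      simp only [Finset.mem_coe, hA, Finset.mem_filter, Finset.mem_Icc, not_le] at hd
      obtain ⟨⟨⟨h2, hh⟩, hdvd⟩, hsd⟩ := hd
      obtain ⟨m, hm⟩ := hdvd
      have hd0 : 0 < d := by omega
      have hnd : n / d = m := by rw [hm]; exact Nat.mul_div_cancel_left m hd0
      have h2d : d * 2 ≤ n := (Nat.le_div_iff_mul_le (by norm_num)).mp hh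
      have hm2 : 2 ≤ m := by rcases m with _ | _ | m <;> omega
      have hnlt : n < d * d := (pv_sqrt_lt n d).mp hsd
      have hmd : m < d := by
        rcases Nat.lt_or_ge m d with h | h
        · exact h
        · exact absurd (hm ▸ hnlt) (Nat.not_lt.mpr (Nat.mul_le_mul_left d h))
      have hmm : m * m < n := by
        have h1 : m * m < d * m := Nat.mul_lt_mul_of_lt_of_le hmd (le_refl m) (by omega)
        rw [hm]
        exact h1
      simp only [Finset.mem_coe, hS, Finset.mem_filter, Finset.mem_Icc]
      rw [hnd]
      exact ⟨⟨⟨by omega, by rw [Nat.le_sqrt]; omega⟩, ⟨d, by rw [hm]; ring⟩⟩, by omega⟩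
    · intro j hj
      simp only [Finset.mem_coe, hS, Finset.mem_filter, Finset.mem_Icc] at hj
      obtain ⟨⟨⟨h2, hjs⟩, hdvd⟩, hjj⟩ := hj
      obtain ⟨k, hk⟩ := hdvd
      have hj0 : 0 < j := by omega
      have hnj : n / j = k := by rw [hk]; exact Nat.mul_div_cancel_left k hj0
      have hjk : j < k := by
        rcases Nat.lt_or_ge j k with h | h
        · exact h
        · exact absurd (hk ▸ hjj) (Nat.not_lt.mpr (Nat.mul_le_mul_left j h))
      have hsk : s < k := by
        rw [hs, pv_sqrt_lt]
        have h1 : j * k < k * k := Nat.mul_lt_mul_of_lt_of_le hjk (le_refl k) (by omega)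
        rw [hk]
        exact h1
      simp only [Finset.mem_coe, hA, Finset.mem_filter, Finset.mem_Icc, not_le]
      rw [hnj]
      refine ⟨⟨⟨by omega, ?_⟩, ⟨j, by rw [hk]; ring⟩⟩, by omega⟩
      rw [Nat.le_div_iff_mul_le (by norm_num)]
      have h1 : k * 2 ≤ k * j := Nat.mul_le_mul_left k h2
      rw [hk, Nat.mul_comm j k]
      exact h1
    · intro d hd
      simp only [Finset.mem_coe, hA, Finset.mem_filter, Finset.mem_Icc] at hd
      show n / (n / d) = d
      exact Nat.div_div_self hd.1.2 (by omega)
    · intro j hj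
      simp only [Finset.mem_coe, hS, Finset.mem_filter, Finset.mem_Icc] at hj
      show n / (n / j) = j
      exact Nat.div_div_self hj.1.2 (by omega)
  rw [hsplitA, hsmall, hbig, hrhs]

-- per-element equality of the two inner computations
theorem pv_cell_eq (x : Int) :
    pvCntA x = (if x ≤ 1 then (0:Int) else pvAltLoop x 2 0) := by
  by_cases hx : x ≤ 1
  · rw [if_pos hx]
    unfold pvCntA
    have h1 : PySem.Int.floordiv x 2 < 1 := by
      rw [PySem.Int.floordiv_lt_iff_lt_mul (by norm_num)]; omega
    rw [PySem.List.pyRange_one_eq_nil (by omega)]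
    rfl
  · rw [if_neg hx]
    set n := x.toNat with hnx
    have hxn : x = (n : Int) := by omega
    have hn : 2 ≤ n := by omega
    rw [hxn, pv_cntA_eq_card n hn,
        pv_altLoop_eq n hn (((n:Int) + 2 - 2).toNat) 2 0 (by omega) (le_refl _),
        pv_key n hn]
    rw [show ((2 : Int).toNat) = 2 from rfl]
    norm_num

theorem pv_fold_eq (l : List Int) : ∀ acc : List Int,
    l.foldl (fun rezultat x =>
      (rezultat ++ [x]) ++
        [(PySem.List.pyRange 2 (PySem.Int.floordiv x 2 + 1) 1).foldl
          (fun nr i => if PySem.Int.mod x i = 0 then nr + 1 else nr) 0]) acc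
    = l.foldl (fun rezultat x =>
      (rezultat ++ [x]) ++ (if x ≤ 1 then [0] else [pvAltLoop x 2 0])) acc := by
  induction l with
  | nil => intro acc; rfl
  | cons x l ih =>
    intro acc
    simp only [List.foldl_cons]
    rw [ih]
    congr 1
    have := pv_cell_eq x
    unfold pvCntA at this
    rw [this]
    by_cases hx : x ≤ 1
    · rw [if_pos hx, if_pos hx]
    · rw [if_neg hx, if_neg hx]

-- ===== VERDICT (by name: the statement is the Claim_ definition above) =====
theorem AdaugaNrDivProprii_spec : Claim_equal_AdaugaNrDivProprii := by
  intro l _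
  unfold Spec_AdaugaNrDivProprii AdaugaNrDivProprii AdaugaNrDivProprii_alt
  exact pv_fold_eq l []
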